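-- pv_equiv track=rewrite | github.com/wesleymaya/pythonLabs | Lab5_WesleyMaya.py | ah
-- ===== SOURCE A (Python) =====
-- def ah(l,x,y):
--
--     lst2 = []
--
--     for i in l:
--         if i >= x and i <= y:
--             lst2 = lst2 + [i]
--
--
--     sums = len(lst2)
--     minn = min(lst2)
--
--     return (sums,minn)
-- ===== SOURCE B (Python) =====
-- def ah(l, x, y):
--     count = 0
--     minn = None
--     for i in l:
--         if x <= i <= y:
--             count += 1
--             if minn is None or i < minn:
--                 minn = i
--     if minn is None:
--         raise ValueError("min() arg is an empty sequence")
--     return (count, minn)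
-- ===== Notes on version B (the rewrite author's own statement) =====
-- stated objective: simpler
-- what changed: B fuses A's build-a-list-then-len/min phases into one pass keeping only a count and a running minimum (no intermediate list; A's list build via repeated concatenation is quadratic).
import Mathlib
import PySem

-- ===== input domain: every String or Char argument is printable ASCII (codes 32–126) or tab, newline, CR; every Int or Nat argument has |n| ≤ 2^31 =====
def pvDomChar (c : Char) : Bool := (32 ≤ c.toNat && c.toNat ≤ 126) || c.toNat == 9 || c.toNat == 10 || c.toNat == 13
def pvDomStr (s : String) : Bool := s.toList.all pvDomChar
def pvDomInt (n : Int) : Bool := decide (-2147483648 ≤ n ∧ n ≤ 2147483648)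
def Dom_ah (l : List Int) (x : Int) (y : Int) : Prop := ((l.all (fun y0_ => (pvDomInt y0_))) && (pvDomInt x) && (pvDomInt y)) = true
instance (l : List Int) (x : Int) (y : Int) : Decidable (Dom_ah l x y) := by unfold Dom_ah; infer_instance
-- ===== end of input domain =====

-- B replaces A's build-a-filtered-list-then-len/min with a single pass keeping a count and a
-- running minimum (Option Int); return values are identical on Pre_ (some element in [x,y]);
-- both Pythons raise ValueError when no element is in range, which Pre_ excludes.

-- ===== PORT A =====
-- lst2 = lst2 + [i] for i in range; then (len(lst2), min(lst2)); min([]) raises → none, .getD 0 unreachable inside Pre_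
def ah (l : List Int) (x : Int) (y : Int) : Int × Int :=
  let lst2 := l.foldl (fun acc i => if i ≥ x ∧ i ≤ y then acc ++ [i] else acc) []
  let sums : Int := lst2.length
  let minn : Int := (PySem.List.min? lst2 (fun z => z)).getD 0
  (sums, minn)

-- ===== PORT B =====
-- single pass: count and running minimum; minn = none at the end is the raising case (outside Pre_)
def ah_alt (l : List Int) (x : Int) (y : Int) : Int × Int :=
  let st := l.foldl
    (fun (st : Int × Option Int) i =>
      if x ≤ i ∧ i ≤ y then
        (st.1 + 1,
         match st.2 with
         | none => some i
         | some m => if i < m then some i else some m)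
      else st)
    (0, none)
  match st.2 with
  | some m => (st.1, m)
  | none => (0, 0)   -- B raises ValueError here; excluded by Pre_

-- ===== PRECONDITION & SPEC =====
-- Pre_ excludes inputs with no element of l in [x,y]: there A raises ValueError from min([]) and B raises the same.
def Pre_ah (l : List Int) (x : Int) (y : Int) : Prop := (l.any (fun i => decide (x ≤ i) && decide (i ≤ y))) = true
instance (l : List Int) (x : Int) (y : Int) : Decidable (Pre_ah l x y) := by unfold Pre_ah; infer_instance
def pvWitness_ah : List Int × Int × Int := ([3, -1, 7], 0, 5)

def Spec_ah (l : List Int) (x : Int) (y : Int) (out : Int × Int) : Prop := out = ah_alt l x y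
instance (l : List Int) (x : Int) (y : Int) (out : Int × Int) : Decidable (Spec_ah l x y out) := by unfold Spec_ah; infer_instance

-- ===== CLAIM (what is proved, stated in full; the proofs are below) =====
def Claim_equal_ah : Prop := ∀ (l : List Int) (x : Int) (y : Int), Dom_ah l x y → Pre_ah l x y → Spec_ah l x y (ah l x y)

-- ===== LEMMAS AND PROOFS =====

-- A's loop builds exactly the filtered list
theorem ah_foldA (l : List Int) (x y : Int) (acc : List Int) :
    l.foldl (fun acc i => if i ≥ x ∧ i ≤ y then acc ++ [i] else acc) acc
      = acc ++ l.filter (fun i => decide (x ≤ i ∧ i ≤ y)) := by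
  induction l generalizing acc with
  | nil => simp
  | cons h t ih =>
    simp only [List.foldl_cons, List.filter_cons]
    by_cases hp : x ≤ h ∧ h ≤ y
    · simp [hp, ih, ge_iff_le]
    · have : ¬ (h ≥ x ∧ h ≤ y) := by exact fun hc => hp ⟨hc.1, hc.2⟩
      simp [hp, ih]

-- B's conditional step, restricted to the filtered list
def ah_step (st : Int × Option Int) (i : Int) : Int × Option Int :=
  (st.1 + 1,
   match st.2 with
   | none => some i
   | some m => if i < m then some i else some m)

-- B's loop over l equals folding the plain step over the filtered list
theorem ah_foldB (l : List Int) (x y : Int) (st : Int × Option Int) :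
    l.foldl
      (fun (st : Int × Option Int) i =>
        if x ≤ i ∧ i ≤ y then
          (st.1 + 1,
           match st.2 with
           | none => some i
           | some m => if i < m then some i else some m)
        else st) st
      = (l.filter (fun i => decide (x ≤ i ∧ i ≤ y))).foldl ah_step st := by
  induction l generalizing st with
  | nil => rfl
  | cons h t ih =>
    simp only [List.foldl_cons, List.filter_cons]
    by_cases hp : x ≤ h ∧ h ≤ y
    · simp [hp, ih, ah_step]
    · simp [hp, ih]

-- running the plain step keeps count = length and minn = running min
theorem ah_step_some (t : List Int) (c : Int) (a : Int) :
    t.foldl ah_step (c, some a) = (c + t.length, some (t.foldl min a)) := by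
  induction t generalizing c a with
  | nil => simp
  | cons h t ih =>
    simp only [List.foldl_cons, ah_step]
    by_cases hlt : h < a
    · rw [if_pos hlt, ih]
      have hm : min a h = h := by omega
      simp only [List.length_cons, hm, Prod.mk.injEq]
      exact ⟨by push_cast; ring, trivial⟩
    · rw [if_neg hlt, ih]
      have hm : min a h = a := by omega
      simp only [List.length_cons, hm, Prod.mk.injEq]
      exact ⟨by push_cast; ring, trivial⟩

theorem ah_spec' (l : List Int) (x y : Int) (hpre : ∃ i ∈ l, x ≤ i ∧ i ≤ y) :
    ah l x y = ah_alt l x y := by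
  unfold ah ah_alt
  rw [ah_foldA, ah_foldB]
  obtain ⟨i, hi, hxi, hiy⟩ := hpre
  have hne : l.filter (fun i => decide (x ≤ i ∧ i ≤ y)) ≠ [] := by
    intro h
    have : i ∈ l.filter (fun i => decide (x ≤ i ∧ i ≤ y)) := by
      simp [List.mem_filter, hi, hxi, hiy]
    rw [h] at this; exact absurd this (List.not_mem_nil)
  obtain ⟨a, t, hft⟩ := List.exists_cons_of_ne_nil hne
  rw [hft]
  simp only [List.foldl_cons, ah_step]
  rw [ah_step_some]
  simp [PySem.List.min?_id_cons]
  omega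

-- ===== VERDICT (by name: the statement is the Claim_ definition above) =====
theorem ah_spec : Claim_equal_ah := by
  intro l x y _ hpre
  unfold Spec_ah
  refine ah_spec' l x y ?_
  unfold Pre_ah at hpre
  simpa using hpre
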